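-- pv_equiv track=rewrite | github.com/anthonykasza/hdc_experiments | toys/python/1d/since-the-last-thing-encoder.py | since_the_last_thing
-- ===== SOURCE A (Python) =====
-- def since_the_last_thing(thing, iterable):
--   '''Count the things since the last thing'''
--   if thing not in iterable:
--     return []
--
--   v = []
--   since_prev_thing = 0
--
--   for idx in range(len(iterable)):
--     if iterable[idx] == thing:
--       v.append(since_prev_thing)
--       since_prev_thing = 0
--     else:
--       since_prev_thing += 1
--
--   return v
-- ===== SOURCE B (Python) =====
-- def since_the_last_thing(thing, iterable):
--   '''Count the things since the last thing'''
--   pos = [i for i, x in enumerate(iterable) if x == thing]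
--   if not pos:
--     return []
--   return [pos[0]] + [b - a - 1 for a, b in zip(pos, pos[1:])]
-- ===== Notes on version B (the rewrite author's own statement) =====
-- stated objective: simpler
-- what changed: Replaces the running since-counter loop (plus a separate membership pre-scan) with an occurrence-index table and a second pass of arithmetic differences pos[i]-pos[i-1]-1.
import Mathlib
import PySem

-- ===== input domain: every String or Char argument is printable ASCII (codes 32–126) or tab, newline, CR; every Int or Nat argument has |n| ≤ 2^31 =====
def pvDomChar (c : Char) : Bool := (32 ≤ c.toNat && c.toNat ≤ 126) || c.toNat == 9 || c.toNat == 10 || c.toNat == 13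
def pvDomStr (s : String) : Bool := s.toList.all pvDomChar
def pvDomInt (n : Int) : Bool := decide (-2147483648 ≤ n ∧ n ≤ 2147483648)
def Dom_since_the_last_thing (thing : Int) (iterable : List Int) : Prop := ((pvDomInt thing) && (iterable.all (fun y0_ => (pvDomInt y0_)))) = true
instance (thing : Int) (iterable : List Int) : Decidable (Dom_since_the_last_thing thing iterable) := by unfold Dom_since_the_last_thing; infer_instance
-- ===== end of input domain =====

-- B replaces A's running since-counter loop with an occurrence-index table followed by
-- arithmetic differences between consecutive indices (objective: simpler decomposition).

-- ===== PORT A =====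
def since_the_last_thing (thing : Int) (iterable : List Int) : List Int :=
  if iterable.contains thing then
    (iterable.foldl
      (fun (st : List Int × Int) x =>
        if x == thing then (st.1 ++ [st.2], 0) else (st.1, st.2 + 1))
      (([] : List Int), 0)).1
  else []

-- ===== PORT B =====
-- helper for B: the comprehension [i for i, x in enumerate(iterable) if x == thing]
def stlt_pos (thing : Int) : List Int → Int → List Int
  | [], _ => []
  | x :: xs, i => if x == thing then i :: stlt_pos thing xs (i + 1) else stlt_pos thing xs (i + 1)

def since_the_last_thing_alt (thing : Int) (iterable : List Int) : List Int :=
  match stlt_pos thing iterable 0 with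
  | [] => []
  | p :: ps => p :: List.zipWith (fun a b => b - a - 1) (p :: ps) ps

-- ===== PRECONDITION & SPEC =====
def Spec_since_the_last_thing (thing : Int) (iterable : List Int) (out : List Int) : Prop := out = since_the_last_thing_alt thing iterable
instance (thing : Int) (iterable : List Int) (out : List Int) : Decidable (Spec_since_the_last_thing thing iterable out) := by unfold Spec_since_the_last_thing; infer_instance

-- ===== CLAIM (what is proved, stated in full; the proofs are below) =====
def Claim_equal_since_the_last_thing : Prop := ∀ (thing : Int) (iterable : List Int), Dom_since_the_last_thing thing iterable → Spec_since_the_last_thing thing iterable (since_the_last_thing thing iterable)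

-- ===== LEMMAS AND PROOFS =====

-- reference recursion for A's loop: the list of gap counts, starting counter s
def stltG (thing : Int) : List Int → Int → List Int
  | [], _ => []
  | x :: xs, s => if x == thing then s :: stltG thing xs 0 else stltG thing xs (s + 1)

theorem stlt_foldl_eq (thing : Int) (l : List Int) : ∀ (v : List Int) (s : Int),
    (l.foldl (fun (st : List Int × Int) x =>
        if x == thing then (st.1 ++ [st.2], 0) else (st.1, st.2 + 1)) (v, s)).1
      = v ++ stltG thing l s := by
  induction l with
  | nil => intro v s; simp [stltG]
  | cons x xs ih =>
    intro v s
    by_cases h : x = thing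
    · have hb : (x == thing) = true := by simp [h]
      rw [List.foldl_cons]
      simp only [hb, if_true]
      rw [ih (v ++ [s]) 0]
      simp [stltG, hb]
    · have hb : (x == thing) = false := by simp [h]
      rw [List.foldl_cons]
      simp only [hb, Bool.false_eq_true, if_false]
      rw [ih v (s + 1)]
      simp [stltG, hb]

theorem stlt_pos_shift (thing : Int) (l : List Int) : ∀ (i : Int),
    stlt_pos thing l (i + 1) = (stlt_pos thing l i).map (· + 1) := by
  induction l with
  | nil => intro i; simp [stlt_pos]
  | cons x xs ih =>
    intro i
    by_cases h : x = thing
    · simp [stlt_pos, h, ih]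
    · simp [stlt_pos, h, ih]

theorem stlt_diffs_shift (qs : List Int) : ∀ (q : Int),
    List.zipWith (fun a b => b - a - 1) ((q + 1) :: qs.map (· + 1)) (qs.map (· + 1))
      = List.zipWith (fun a b => b - a - 1) (q :: qs) qs := by
  induction qs with
  | nil => intro q; simp
  | cons r rs ih =>
    intro q
    simp only [List.map_cons, List.zipWith_cons_cons]
    rw [ih r]
    congr 1
    ring

theorem stltG_eq_pos (thing : Int) (l : List Int) : ∀ (s : Int),
    stltG thing l s =
      match stlt_pos thing l 0 with
      | [] => []
      | p :: ps => (s + p) :: List.zipWith (fun a b => b - a - 1) (p :: ps) ps := by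
  induction l with
  | nil => intro s; simp [stltG, stlt_pos]
  | cons x xs ih =>
    intro s
    by_cases h : x = thing
    · have hb : (x == thing) = true := by simp [h]
      have hpos : stlt_pos thing (x :: xs) 0 = 0 :: (stlt_pos thing xs 0).map (· + 1) := by
        have h1 := stlt_pos_shift thing xs 0
        simp only [stlt_pos, hb, if_true]
        simpa using h1
      have hG : stltG thing (x :: xs) s = s :: stltG thing xs 0 := by
        simp only [stltG, hb, if_true]
      rw [hG, ih 0, hpos]
      cases hq : stlt_pos thing xs 0 with
      | nil => simp
      | cons q qs =>
        have hd := stlt_diffs_shift qs q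
        simp only [List.map_cons, List.zipWith_cons_cons]
        rw [hd]
        norm_num
    · have hb : (x == thing) = false := by simp [h]
      have hpos : stlt_pos thing (x :: xs) 0 = (stlt_pos thing xs 0).map (· + 1) := by
        have h1 := stlt_pos_shift thing xs 0
        simp only [stlt_pos, hb, Bool.false_eq_true, if_false]
        simpa using h1
      have hG : stltG thing (x :: xs) s = stltG thing xs (s + 1) := by
        simp only [stltG, hb, Bool.false_eq_true, if_false]
      rw [hG, ih (s + 1), hpos]
      cases hq : stlt_pos thing xs 0 with
      | nil => simp
      | cons q qs =>
        have hd := stlt_diffs_shift qs q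
        simp only [List.map_cons]
        rw [hd]
        congr 1
        ring

theorem stlt_pos_nil_of_not_contains (thing : Int) (l : List Int) : ∀ (i : Int),
    l.contains thing = false → stlt_pos thing l i = [] := by
  induction l with
  | nil => intro i _; rfl
  | cons x xs ih =>
    intro i h
    have hmem : thing ∉ x :: xs := by simpa using h
    have hb : (x == thing) = false := by
      simp only [beq_eq_false_iff_ne, ne_eq]
      intro he
      exact hmem (by simp [he])
    have h2 : xs.contains thing = false := by
      simpa using fun hm => hmem (List.mem_cons_of_mem x hm)
    rw [stlt_pos]
    simp only [hb, Bool.false_eq_true, if_false]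
    exact ih (i + 1) h2

-- ===== VERDICT (by name: the statement is the Claim_ definition above) =====
theorem since_the_last_thing_spec : Claim_equal_since_the_last_thing := by
  intro thing iterable _
  show since_the_last_thing thing iterable = since_the_last_thing_alt thing iterable
  unfold since_the_last_thing since_the_last_thing_alt
  by_cases hc : iterable.contains thing
  · rw [if_pos hc, stlt_foldl_eq, List.nil_append, stltG_eq_pos]
    cases stlt_pos thing iterable 0 with
    | nil => rfl
    | cons p ps => simp
  · rw [if_neg hc,
      stlt_pos_nil_of_not_contains thing iterable 0 (by simpa using hc)]
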